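-- pv_equiv track=rewrite | github.com/miguedelillo/club-de-datos | edicion-invierno/Club de datos.py | pares_menoresque
-- ===== SOURCE A (Python) =====
-- def pares_menoresque(x):
--     lista = [] # [2,4,6,8,10]
--     for i in range(x):
--         resto = i % 2
--         es_par = resto == 0
--         if es_par:
--             lista.append(i)
--     return lista
-- ===== SOURCE B (Python) =====
-- def pares_menoresque(x):
--     n = (x + 1) // 2
--     return [2 * k for k in range(n)]
-- ===== Notes on version B (the rewrite author's own statement) =====
-- stated objective: alternative
-- what changed: B computes the count of evens in closed form as (x+1)//2 and produces each even by doubling its index, instead of scanning every integer below x and testing its parity.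
import Mathlib
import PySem

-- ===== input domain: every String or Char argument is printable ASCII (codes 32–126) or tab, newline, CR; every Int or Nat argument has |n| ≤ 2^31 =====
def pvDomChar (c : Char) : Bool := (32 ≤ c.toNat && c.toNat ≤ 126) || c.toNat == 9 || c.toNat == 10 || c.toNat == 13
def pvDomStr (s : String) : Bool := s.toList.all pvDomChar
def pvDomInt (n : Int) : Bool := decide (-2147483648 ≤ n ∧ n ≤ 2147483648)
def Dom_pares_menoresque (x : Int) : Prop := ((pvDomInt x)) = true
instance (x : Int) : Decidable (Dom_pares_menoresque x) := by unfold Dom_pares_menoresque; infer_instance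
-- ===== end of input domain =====

-- B generates the evens directly as 2*k for k < (x+1)//2 instead of filtering range(x) by parity.

-- ===== PORT A =====
def pares_menoresque (x : Int) : List Int :=
  (PySem.List.pyRange 0 x 1).foldl
    (fun lista i =>
      let resto := PySem.Int.mod i 2
      let es_par := resto == 0
      if es_par then lista ++ [i] else lista) []

-- ===== PORT B =====
def pares_menoresque_alt (x : Int) : List Int :=
  let n := PySem.Int.floordiv (x + 1) 2
  (PySem.List.pyRange 0 n 1).map (fun k => 2 * k)

-- ===== PRECONDITION & SPEC =====
def Spec_pares_menoresque (x : Int) (out : List Int) : Prop := out = pares_menoresque_alt x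
instance (x : Int) (out : List Int) : Decidable (Spec_pares_menoresque x out) := by unfold Spec_pares_menoresque; infer_instance

-- ===== CLAIM (what is proved, stated in full; the proofs are below) =====
def Claim_equal_pares_menoresque : Prop := ∀ (x : Int), Dom_pares_menoresque x → Spec_pares_menoresque x (pares_menoresque x)

-- ===== LEMMAS AND PROOFS =====

theorem pares_key : ∀ (n : Nat),
    ((PySem.List.pyRange 0 (n : Int) 1).filter (fun i => PySem.Int.mod i 2 == 0))
      = (PySem.List.pyRange 0 (PySem.Int.floordiv ((n : Int) + 1) 2) 1).map (fun k => 2 * k) := by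
  intro n
  induction n with
  | zero => decide
  | succ m ih =>
    have h1 : ((m : Int) + 1) = ((m : Nat) + 1 : Nat) := by push_cast; ring
    rw [show ((m + 1 : Nat) : Int) = (m : Int) + 1 by push_cast; ring,
        PySem.List.pyRange_one_succ_right (by positivity), List.filter_append, ih]
    by_cases hpar : (2 : Int) ∣ (m : Int)
    · obtain ⟨k, hk⟩ := hpar
      have hkn : 0 ≤ k := by omega
      have hm : PySem.Int.floordiv ((m : Int) + 1) 2 = k := by
        rw [PySem.Int.floordiv_eq_ediv_of_pos (by norm_num)]; omega
      have hm2 : PySem.Int.floordiv ((m : Int) + 1 + 1) 2 = k + 1 := by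
        rw [PySem.Int.floordiv_eq_ediv_of_pos (by norm_num)]; omega
      rw [hm, hm2, PySem.List.pyRange_one_succ_right (by omega)]
      simp only [List.map_append, List.map_cons, List.map_nil]
      have : ((List.filter (fun i => PySem.Int.mod i 2 == 0) [(m : Int)])) = [(m : Int)] := by
        simp only [List.filter]
        rw [show (PySem.Int.mod (m:Int) 2 == 0) = true by simpa [PySem.Int.mod_eq_zero_iff_dvd] using ⟨k, hk⟩]
      rw [this, hk]
    · have hodd : ¬ ((2:Int) ∣ ((m : Int))) := hpar
      have : ((List.filter (fun i => PySem.Int.mod i 2 == 0) [(m : Int)])) = [] := by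
        simp only [List.filter]
        rw [show (PySem.Int.mod (m:Int) 2 == 0) = false by simpa [PySem.Int.mod_eq_zero_iff_dvd] using hodd]
      rw [this, List.append_nil]
      have : PySem.Int.floordiv ((m : Int) + 1 + 1) 2 = PySem.Int.floordiv ((m : Int) + 1) 2 := by
        rw [PySem.Int.floordiv_eq_ediv_of_pos (by norm_num),
            PySem.Int.floordiv_eq_ediv_of_pos (by norm_num)]
        omega
      rw [this]

-- ===== VERDICT (by name: the statement is the Claim_ definition above) =====
theorem pares_menoresque_spec : Claim_equal_pares_menoresque := by
  intro x _
  unfold Spec_pares_menoresque pares_menoresque pares_menoresque_alt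
  simp only [PySem.List.foldl_append_if_eq_filter, List.nil_append]
  by_cases hx : x ≤ 0
  · rw [PySem.List.pyRange_one_eq_nil hx, PySem.List.pyRange_one_eq_nil]
    · simp
    · rw [PySem.Int.floordiv_eq_ediv_of_pos (by norm_num)]; omega
  · have := pares_key x.toNat
    rwa [Int.toNat_of_nonneg (by omega)] at this
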